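-- pv_equiv track=rewrite | github.com/juliordzcer/bebop_ros | bebop_gz/world_generator.py | generate_yaml_config
-- ===== SOURCE A (Python) =====
-- def generate_yaml_config(num_drones):
--     yaml_lines = []
--
--     # Configuración común para cada dron
--     for i in range(1, num_drones + 1):
--         bebop_name = f'bebop{i}'
--
--         drone_config = f"""# Robot {i}
-- # Velocity command configuration.
-- - topic_name: "/{bebop_name}/cmd_vel"
--   ros_type_name: "geometry_msgs/msg/Twist"
--   gz_type_name: "gz.msgs.Twist"
--   lazy: true
--   direction: ROS_TO_GZ
--
-- # Motor speed command configuration.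
-- - topic_name: "/{bebop_name}/gazebo/command/motor_speed"
--   ros_type_name: "std_msgs/msg/Float32"
--   gz_type_name: "gz.msgs.Float"
--   lazy: true
--   direction: ROS_TO_GZ
--
-- # Enable Quadrotor command configuration.
-- - topic_name: "/{bebop_name}/enable"
--   ros_type_name: "std_msgs/msg/Bool"
--   gz_type_name: "gz.msgs.Boolean"
--   lazy: true
--   direction: ROS_TO_GZ
--
-- # Pose state configuration.
-- - topic_name: "/{bebop_name}/pose"
--   ros_type_name: "geometry_msgs/msg/Pose"
--   gz_type_name: "gz.msgs.Pose"
--   lazy: true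
--   direction: GZ_TO_ROS
--
-- # Initial Pose configuration.
-- - topic_name: "/{bebop_name}/set_pose"
--   ros_type_name: "geometry_msgs/msg/Pose"
--   gz_type_name: "gz.msgs.Pose"
--   lazy: true
--   direction: ROS_TO_GZ
--
-- # rgbd_camera_bridge configuration.
-- - topic_name: "/world/bebop/model/{bebop_name}/link/body/sensor/rgb_camera_sensor/image"
--   ros_type_name: "sensor_msgs/msg/Image"
--   gz_type_name: "gz.msgs.Image"
--   lazy: true
--   direction: GZ_TO_ROS
--
-- - topic_name: "/world/bebop/model/{bebop_name}/link/body/sensor/rgb_camera_sensor/camera_info"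
--   ros_type_name: "sensor_msgs/msg/CameraInfo"
--   gz_type_name: "gz.msgs.CameraInfo"
--   lazy: true
--   direction: GZ_TO_ROS
-- """
--         yaml_lines.append(drone_config)
--
--     # Unir todas las configuraciones
--     full_yaml = "\n".join(yaml_lines)
--
--     return full_yaml
-- ===== SOURCE B (Python) =====
-- _TOPICS = [
--     ("# Velocity command configuration.\n", "/", "/cmd_vel",
--      "geometry_msgs/msg/Twist", "gz.msgs.Twist", "ROS_TO_GZ"),
--     ("\n# Motor speed command configuration.\n", "/", "/gazebo/command/motor_speed",
--      "std_msgs/msg/Float32", "gz.msgs.Float", "ROS_TO_GZ"),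
--     ("\n# Enable Quadrotor command configuration.\n", "/", "/enable",
--      "std_msgs/msg/Bool", "gz.msgs.Boolean", "ROS_TO_GZ"),
--     ("\n# Pose state configuration.\n", "/", "/pose",
--      "geometry_msgs/msg/Pose", "gz.msgs.Pose", "GZ_TO_ROS"),
--     ("\n# Initial Pose configuration.\n", "/", "/set_pose",
--      "geometry_msgs/msg/Pose", "gz.msgs.Pose", "ROS_TO_GZ"),
--     ("\n# rgbd_camera_bridge configuration.\n", "/world/bebop/model/",
--      "/link/body/sensor/rgb_camera_sensor/image",
--      "sensor_msgs/msg/Image", "gz.msgs.Image", "GZ_TO_ROS"),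
--     ("\n", "/world/bebop/model/",
--      "/link/body/sensor/rgb_camera_sensor/camera_info",
--      "sensor_msgs/msg/CameraInfo", "gz.msgs.CameraInfo", "GZ_TO_ROS"),
-- ]
--
--
-- def generate_yaml_config(num_drones):
--     blocks = []
--     for i in range(1, num_drones + 1):
--         name = f'bebop{i}'
--         parts = [f'# Robot {i}\n']
--         for comment, pre, post, ros, gz, direction in _TOPICS:
--             parts.append(
--                 f'{comment}- topic_name: "{pre}{name}{post}"\n'
--                 f'  ros_type_name: "{ros}"\n'
--                 f'  gz_type_name: "{gz}"\n'
--                 f'  lazy: true\n'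
--                 f'  direction: {direction}\n'
--             )
--         blocks.append(''.join(parts))
--     return '\n'.join(blocks)
-- ===== Notes on version B (the rewrite author's own statement) =====
-- stated objective: alternative
-- what changed: B replaces A's single monolithic per-drone f-string template with a data-driven build: a table of seven topic descriptors (comment, topic prefix/suffix, ros type, gz type, direction) is iterated per drone, formatting a small fixed per-topic template and joining the parts.
import Mathlib
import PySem

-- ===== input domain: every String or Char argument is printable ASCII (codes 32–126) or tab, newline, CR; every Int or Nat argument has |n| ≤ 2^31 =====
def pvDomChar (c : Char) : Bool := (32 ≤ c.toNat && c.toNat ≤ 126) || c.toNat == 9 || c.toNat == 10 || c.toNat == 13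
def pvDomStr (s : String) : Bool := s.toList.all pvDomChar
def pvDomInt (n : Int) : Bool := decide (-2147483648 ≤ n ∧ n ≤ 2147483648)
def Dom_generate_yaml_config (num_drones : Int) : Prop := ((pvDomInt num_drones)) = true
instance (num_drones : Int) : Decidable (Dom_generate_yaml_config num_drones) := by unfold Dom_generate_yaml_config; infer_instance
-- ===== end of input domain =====

-- B rebuilds each drone block from a table of topic descriptors instead of one monolithic
-- f-string template (objective: alternative data-driven decomposition; same output, same cost).

-- ===== PORT A =====
def generate_yaml_config (num_drones : Int) : String :=
  let yaml_lines := (PySem.List.pyRange 1 (num_drones + 1) 1).foldl (fun acc i =>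
    let bebop_name := "bebop" ++ PySem.Int.toStr i
    let drone_config := "# Robot " ++ PySem.Int.toStr i ++ "\n# Velocity command configuration.\n- topic_name: \"/" ++ bebop_name ++ "/cmd_vel\"\n  ros_type_name: \"geometry_msgs/msg/Twist\"\n  gz_type_name: \"gz.msgs.Twist\"\n  lazy: true\n  direction: ROS_TO_GZ\n\n# Motor speed command configuration.\n- topic_name: \"/" ++ bebop_name ++ "/gazebo/command/motor_speed\"\n  ros_type_name: \"std_msgs/msg/Float32\"\n  gz_type_name: \"gz.msgs.Float\"\n  lazy: true\n  direction: ROS_TO_GZ\n\n# Enable Quadrotor command configuration.\n- topic_name: \"/" ++ bebop_name ++ "/enable\"\n  ros_type_name: \"std_msgs/msg/Bool\"\n  gz_type_name: \"gz.msgs.Boolean\"\n  lazy: true\n  direction: ROS_TO_GZ\n\n# Pose state configuration.\n- topic_name: \"/" ++ bebop_name ++ "/pose\"\n  ros_type_name: \"geometry_msgs/msg/Pose\"\n  gz_type_name: \"gz.msgs.Pose\"\n  lazy: true\n  direction: GZ_TO_ROS\n\n# Initial Pose configuration.\n- topic_name: \"/" ++ bebop_name ++ "/set_pose\"\n  ros_type_name: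 \"geometry_msgs/msg/Pose\"\n  gz_type_name: \"gz.msgs.Pose\"\n  lazy: true\n  direction: ROS_TO_GZ\n\n# rgbd_camera_bridge configuration.\n- topic_name: \"/world/bebop/model/" ++ bebop_name ++ "/link/body/sensor/rgb_camera_sensor/image\"\n  ros_type_name: \"sensor_msgs/msg/Image\"\n  gz_type_name: \"gz.msgs.Image\"\n  lazy: true\n  direction: GZ_TO_ROS\n\n- topic_name: \"/world/bebop/model/" ++ bebop_name ++ "/link/body/sensor/rgb_camera_sensor/camera_info\"\n  ros_type_name: \"sensor_msgs/msg/CameraInfo\"\n  gz_type_name: \"gz.msgs.CameraInfo\"\n  lazy: true\n  direction: GZ_TO_ROS\n"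
    acc ++ [drone_config]) []
  PySem.Str.join "\n" yaml_lines

-- ===== PORT B =====
def pvTopics : List (String × String × String × String × String × String) :=
  [("# Velocity command configuration.\n", "/", "/cmd_vel", "geometry_msgs/msg/Twist", "gz.msgs.Twist", "ROS_TO_GZ"),
  ("\n# Motor speed command configuration.\n", "/", "/gazebo/command/motor_speed", "std_msgs/msg/Float32", "gz.msgs.Float", "ROS_TO_GZ"),
  ("\n# Enable Quadrotor command configuration.\n", "/", "/enable", "std_msgs/msg/Bool", "gz.msgs.Boolean", "ROS_TO_GZ"),
  ("\n# Pose state configuration.\n", "/", "/pose", "geometry_msgs/msg/Pose", "gz.msgs.Pose", "GZ_TO_ROS"),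
  ("\n# Initial Pose configuration.\n", "/", "/set_pose", "geometry_msgs/msg/Pose", "gz.msgs.Pose", "ROS_TO_GZ"),
  ("\n# rgbd_camera_bridge configuration.\n", "/world/bebop/model/", "/link/body/sensor/rgb_camera_sensor/image", "sensor_msgs/msg/Image", "gz.msgs.Image", "GZ_TO_ROS"),
  ("\n", "/world/bebop/model/", "/link/body/sensor/rgb_camera_sensor/camera_info", "sensor_msgs/msg/CameraInfo", "gz.msgs.CameraInfo", "GZ_TO_ROS")]

def generate_yaml_config_alt (num_drones : Int) : String :=
  let blocks := (PySem.List.pyRange 1 (num_drones + 1) 1).foldl (fun acc i =>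
    let name := "bebop" ++ PySem.Int.toStr i
    let parts := pvTopics.foldl (fun ps t =>
      ps ++ [t.1 ++ "- topic_name: \"" ++ t.2.1 ++ name ++ t.2.2.1 ++ "\"\n  ros_type_name: \"" ++ t.2.2.2.1 ++ "\"\n  gz_type_name: \"" ++ t.2.2.2.2.1 ++ "\"\n  lazy: true\n  direction: " ++ t.2.2.2.2.2 ++ "\n"]) ["# Robot " ++ PySem.Int.toStr i ++ "\n"]
    acc ++ [PySem.Str.join "" parts]) []
  PySem.Str.join "\n" blocks

-- ===== PRECONDITION & SPEC =====
def Spec_generate_yaml_config (num_drones : Int) (out : String) : Prop := out = generate_yaml_config_alt num_drones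
instance (num_drones : Int) (out : String) : Decidable (Spec_generate_yaml_config num_drones out) := by unfold Spec_generate_yaml_config; infer_instance

-- ===== CLAIM (what is proved, stated in full; the proofs are below) =====
def Claim_equal_generate_yaml_config : Prop := ∀ (num_drones : Int), Dom_generate_yaml_config num_drones → Spec_generate_yaml_config num_drones (generate_yaml_config num_drones)

-- ===== LEMMAS AND PROOFS =====
-- The per-drone block A's template produces equals the block B assembles from pvTopics.
set_option maxRecDepth 8192 in
theorem pv_block_eq (i : Int) :
    "# Robot " ++ PySem.Int.toStr i ++ "\n# Velocity command configuration.\n- topic_name: \"/" ++ ("bebop" ++ PySem.Int.toStr i) ++ "/cmd_vel\"\n  ros_type_name: \"geometry_msgs/msg/Twist\"\n  gz_type_name: \"gz.msgs.Twist\"\n  lazy: true\n  direction: ROS_TO_GZ\n\n# Motor speed command configuration.\n- topic_name: \"/" ++ ("bebop" ++ PySem.Int.toStr i) ++ "/gazebo/command/motor_speed\"\n  ros_type_name: \"std_msgs/msg/Float32\"\n  gz_type_name: \"gz.msgs.Float\"\n  lazy: true\n  direction: ROS_TO_GZ\n\n# Enable Quadrotor command configuration.\n- topic_name: \"/" ++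 ("bebop" ++ PySem.Int.toStr i) ++ "/enable\"\n  ros_type_name: \"std_msgs/msg/Bool\"\n  gz_type_name: \"gz.msgs.Boolean\"\n  lazy: true\n  direction: ROS_TO_GZ\n\n# Pose state configuration.\n- topic_name: \"/" ++ ("bebop" ++ PySem.Int.toStr i) ++ "/pose\"\n  ros_type_name: \"geometry_msgs/msg/Pose\"\n  gz_type_name: \"gz.msgs.Pose\"\n  lazy: true\n  direction: GZ_TO_ROS\n\n# Initial Pose configuration.\n- topic_name: \"/" ++ ("bebop" ++ PySem.Int.toStr i) ++ "/set_pose\"\n  ros_type_name: \"geometry_msgs/msg/Pose\"\n  gz_type_name: \"gz.msgs.Pose\"\n  lazy: true\n  direction: ROS_TO_GZ\n\n# rgbd_camera_bridge configuration.\n- topic_name: \"/world/bebop/model/" ++ ("bebop" ++ PySem.Int.toStr i) ++ "/link/body/sensor/rgb_camera_sensor/image\"\n  ros_type_name: \"sensor_msgs/msg/Image\"\n  gz_type_name: \"gz.msgs.Image\"\n  lazy: true\n  direction: GZ_TO_ROS\n\n- topic_name: \"/world/bebop/model/" ++ ("bebop" ++ PySem.Int.toStr i) ++ "/link/body/sensor/rgb_camera_sensor/camera_info\"\n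  ros_type_name: \"sensor_msgs/msg/CameraInfo\"\n  gz_type_name: \"gz.msgs.CameraInfo\"\n  lazy: true\n  direction: GZ_TO_ROS\n" =
    PySem.Str.join "" (pvTopics.foldl (fun ps t =>
      ps ++ [t.1 ++ "- topic_name: \"" ++ t.2.1 ++ ("bebop" ++ PySem.Int.toStr i) ++ t.2.2.1 ++ "\"\n  ros_type_name: \"" ++ t.2.2.2.1 ++ "\"\n  gz_type_name: \"" ++ t.2.2.2.2.1 ++ "\"\n  lazy: true\n  direction: " ++ t.2.2.2.2.2 ++ "\n"]) ["# Robot " ++ PySem.Int.toStr i ++ "\n"]) := by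
  rw [← String.toList_inj]
  simp [pvTopics, PySem.Str.join, PySem.Chars.join, List.intercalate]

-- ===== VERDICT (by name: the statement is the Claim_ definition above) =====
theorem generate_yaml_config_spec : Claim_equal_generate_yaml_config := by
  intro n _
  unfold Spec_generate_yaml_config generate_yaml_config generate_yaml_config_alt
  simp only [PySem.List.foldl_append_singleton_eq_map, List.nil_append]
  exact congrArg (PySem.Str.join "\n") (List.map_congr_left (fun i _ => pv_block_eq i))
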